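-- pv_equiv track=rewrite | github.com/coocos/advent-of-code-2018 | day2.py | generate_checksum_components
-- ===== SOURCE A (Python) =====
-- from typing import Tuple, List
-- from collections import Counter
--
-- def generate_checksum_components(box: str) -> Tuple[int, int]:
--     """
--     Generates the checksum components from the string and returns a tuple
--     indicating whether a character appeared twice or thrice in string. For
--     example a (1, 1) would indicate that at least one character appeared twice
--     and at least one character appeared thrice in the in the string.
--     """
--     character_count = Counter(box)
--
--     twice = 0
--     thrice = 0
--
--     for count in character_count.values():
--         if count == 2:
--             twice = 1
--         elif count == 3:
--             thrice = 1
--         if twice and thrice: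
--             break
--
--     return (twice, thrice)
-- ===== SOURCE B (Python) =====
-- def generate_checksum_components(box):
--     """Sort the string and scan consecutive runs of equal characters,
--     setting the twice/thrice flags from run lengths."""
--     twice = 0
--     thrice = 0
--     run = 0
--     prev = None
--     for ch in sorted(box):
--         if prev == ch:
--             run += 1
--         elif run == 2:
--             twice, run, prev = 1, 1, ch
--         elif run == 3:
--             thrice, run, prev = 1, 1, ch
--         else:
--             run, prev = 1, ch
--     if run == 2:
--         twice = 1
--     elif run == 3:
--         thrice = 1
--     return (twice, thrice)
-- ===== Notes on version B (the rewrite author's own statement) =====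
-- stated objective: alternative
-- what changed: B drops the Counter dictionary entirely: it sorts the string and scans consecutive runs of equal characters once, setting the twice/thrice flags from run lengths.
import Mathlib
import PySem

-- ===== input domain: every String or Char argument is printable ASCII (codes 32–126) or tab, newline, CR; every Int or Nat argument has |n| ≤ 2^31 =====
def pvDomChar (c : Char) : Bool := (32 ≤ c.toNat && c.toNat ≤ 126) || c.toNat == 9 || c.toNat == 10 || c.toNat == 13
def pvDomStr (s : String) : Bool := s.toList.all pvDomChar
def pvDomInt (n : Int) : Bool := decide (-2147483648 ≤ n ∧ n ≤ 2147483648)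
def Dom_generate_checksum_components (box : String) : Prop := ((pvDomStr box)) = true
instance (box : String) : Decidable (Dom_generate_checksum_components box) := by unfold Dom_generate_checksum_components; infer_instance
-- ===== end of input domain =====

-- B replaces A's Counter dictionary by sorting the string and scanning runs of equal characters (alternative decomposition).

-- ===== PORT A =====
-- the for-loop over Counter values with its early break
def pvALoop : List Int → Int → Int → Int × Int
  | [], tw, th => (tw, th)
  | c :: rest, tw, th =>
    let p := if c = 2 then ((1 : Int), th) else if c = 3 then (tw, (1 : Int)) else (tw, th)
    if p.1 ≠ 0 ∧ p.2 ≠ 0 then p else pvALoop rest p.1 p.2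

def generate_checksum_components (box : String) : Int × Int :=
  pvALoop (PySem.Dict.counter box.toList).values 0 0

-- ===== PORT B =====
-- one step of B's run scan; state = (twice, thrice, run, prev)
def pvBStep : (Int × Int × Int × Option Char) → Char → (Int × Int × Int × Option Char)
  | (tw, th, run, prev), ch =>
    if prev = some ch then (tw, th, run + 1, prev)
    else if run = 2 then (1, th, 1, some ch)
    else if run = 3 then (tw, 1, 1, some ch)
    else (tw, th, 1, some ch)

-- the flush after the loop
def pvBFinish : (Int × Int × Int × Option Char) → Int × Int
  | (tw, th, run, _) =>
    if run = 2 then (1, th) else if run = 3 then (tw, 1) else (tw, th)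

def generate_checksum_components_alt (box : String) : Int × Int :=
  pvBFinish ((PySem.List.sorted box.toList (fun c => c) false).foldl pvBStep (0, 0, 0, none))

-- ===== PRECONDITION & SPEC =====
def Spec_generate_checksum_components (box : String) (out : Int × Int) : Prop := out = generate_checksum_components_alt box
instance (box : String) (out : Int × Int) : Decidable (Spec_generate_checksum_components box out) := by unfold Spec_generate_checksum_components; infer_instance

-- ===== CLAIM (what is proved, stated in full; the proofs are below) =====
def Claim_equal_generate_checksum_components : Prop := ∀ (box : String), Dom_generate_checksum_components box → Spec_generate_checksum_components box (generate_checksum_components box)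

-- ===== LEMMAS AND PROOFS =====

theorem pvALoop_char (cs : List Int) (tw th : Int)
    (htw : tw = 0 ∨ tw = 1) (hth : th = 0 ∨ th = 1) :
    pvALoop cs tw th =
      ((if tw = 1 ∨ (2 : Int) ∈ cs then 1 else 0),
       (if th = 1 ∨ (3 : Int) ∈ cs then 1 else 0)) := by
  induction cs generalizing tw th with
  | nil =>
    simp [pvALoop]
    constructor
    · rcases htw with h | h <;> simp [h]
    · rcases hth with h | h <;> simp [h]
  | cons c rest ih =>
    by_cases h2 : c = 2
    · subst h2
      by_cases hth1 : th = 1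
      · subst hth1
        simp [pvALoop]
      · have hth0 : th = 0 := by rcases hth with h | h; exact h; exact absurd h hth1
        subst hth0
        simp [pvALoop, ih _ _ (Or.inr rfl) (Or.inl rfl)]
    · by_cases h3 : c = 3
      · subst h3
        by_cases htw1 : tw = 1
        · subst htw1
          simp [pvALoop]
        · have htw0 : tw = 0 := by rcases htw with h | h; exact h; exact absurd h htw1
          subst htw0
          simp [pvALoop, ih _ _ (Or.inl rfl) (Or.inr rfl)]
      · have h2' : ¬ ((2 : Int) = c) := fun h => h2 h.symm
        have h3' : ¬ ((3 : Int) = c) := fun h => h3 h.symm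
        rcases htw with htw0 | htw1
        · subst htw0
          simp [pvALoop, h2, h3, ih _ _ (Or.inl rfl) hth, h2', h3']
        · subst htw1
          rcases hth with hth0 | hth1
          · subst hth0
            simp [pvALoop, h2, h3, ih _ _ (Or.inr rfl) (Or.inl rfl), h2', h3']
          · subst hth1
            simp [pvALoop, h2, h3]

theorem pvB_inv (l : List Char) (hs : l.Pairwise (· ≤ ·)) (tw th run : Int) (a : Char)
    (htw : tw = 0 ∨ tw = 1) (hth : th = 0 ∨ th = 1) (hrun : 1 ≤ run)
    (hall : ∀ x ∈ l, a ≤ x) :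
    pvBFinish (l.foldl pvBStep (tw, th, run, some a)) =
      ((if tw = 1 ∨ run + l.count a = 2 ∨ (∃ c ∈ l, c ≠ a ∧ (l.count c : Int) = 2) then 1 else 0),
       (if th = 1 ∨ run + l.count a = 3 ∨ (∃ c ∈ l, c ≠ a ∧ (l.count c : Int) = 3) then 1 else 0)) := by
  induction l generalizing tw th run a with
  | nil =>
    simp only [List.foldl_nil, List.count_nil, pvBFinish, List.not_mem_nil]
    rcases htw with h | h <;> rcases hth with h' | h' <;> subst h <;> subst h' <;>
      by_cases hr2 : run = 2 <;> by_cases hr3 : run = 3 <;>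
      simp_all
  | cons x xs ih =>
    have hx : a ≤ x := hall x (List.mem_cons_self ..)
    have hxs : ∀ y ∈ xs, x ≤ y := (List.pairwise_cons.mp hs).1
    by_cases hax : a = x
    · subst hax
      have hstep : pvBStep (tw, th, run, some a) a = (tw, th, run + 1, some a) := by
        simp [pvBStep]
      rw [List.foldl_cons, hstep,
        ih (List.pairwise_cons.mp hs).2 tw th (run + 1) a htw hth (by omega) hxs]
      have hc : ((a :: xs).count a : Int) = (xs.count a : Int) + 1 := by
        simp
      have hiff : ∀ (f : Int) (k : Int),
          (f = 1 ∨ run + 1 + (xs.count a : Int) = k ∨ (∃ c ∈ xs, c ≠ a ∧ (xs.count c : Int) = k)) ↔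
          (f = 1 ∨ run + ((a :: xs).count a : Int) = k ∨
            (∃ c ∈ a :: xs, c ≠ a ∧ ((a :: xs).count c : Int) = k)) := by
        intro f k
        constructor
        · rintro (h | h | ⟨c, hc1, hc2, hc3⟩)
          · exact Or.inl h
          · refine Or.inr (Or.inl ?_); rw [hc]; omega
          · exact Or.inr (Or.inr ⟨c, List.mem_cons_of_mem _ hc1, hc2,
              by simpa [List.count_cons, Ne.symm hc2] using hc3⟩)
        · rintro (h | h | ⟨c, hc1, hc2, hc3⟩)
          · exact Or.inl h
          · refine Or.inr (Or.inl ?_); rw [hc] at h; omega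
          · rcases List.mem_cons.mp hc1 with h' | h'
            · exact absurd h' hc2
            · exact Or.inr (Or.inr ⟨c, h', hc2,
                by simpa [List.count_cons, Ne.symm hc2] using hc3⟩)
      congr 1
      · exact if_congr (hiff tw 2) rfl rfl
      · exact if_congr (hiff th 3) rfl rfl
    · -- a ≠ x: flush the run and start a new one at x
      have hlt : a < x := lt_of_le_of_ne hx hax
      have hnx : ¬ (some a = some x) := by simp [hax]
      have hamem : a ∉ x :: xs := by
        intro hm
        rcases List.mem_cons.mp hm with h' | h'
        · exact hax h'
        · exact absurd rfl (ne_of_lt (lt_of_lt_of_le hlt (hxs a h')))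
      have hca : (x :: xs).count a = 0 := List.count_eq_zero.mpr hamem
      have hstep : pvBStep (tw, th, run, some a) x =
          (if run = 2 then ((1 : Int), th, (1 : Int), some x)
           else if run = 3 then (tw, 1, 1, some x) else (tw, th, 1, some x)) := by
        simp [pvBStep, hnx]
      have key : ∀ tw' th', tw' = 0 ∨ tw' = 1 → th' = 0 ∨ th' = 1 →
          pvBFinish (List.foldl pvBStep (tw', th', 1, some x) xs) =
            ((if tw' = 1 ∨ (1 : Int) + (xs.count x : Int) = 2 ∨ (∃ c ∈ xs, c ≠ x ∧ (xs.count c : Int) = 2) then 1 else 0),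
             (if th' = 1 ∨ (1 : Int) + (xs.count x : Int) = 3 ∨ (∃ c ∈ xs, c ≠ x ∧ (xs.count c : Int) = 3) then 1 else 0)) :=
        fun tw' th' h1 h2 => ih (List.pairwise_cons.mp hs).2 tw' th' 1 x h1 h2 le_rfl hxs
      have hcnt : (((x :: xs).count a : Nat) : Int) = 0 := by exact_mod_cast hca
      have hE : ∀ k : Int,
          ((1 : Int) + (xs.count x : Int) = k ∨ (∃ c ∈ xs, c ≠ x ∧ (xs.count c : Int) = k)) ↔
          (∃ c ∈ x :: xs, c ≠ a ∧ ((x :: xs).count c : Int) = k) := by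
        intro k
        constructor
        · rintro (h | ⟨c, hc1, hc2, hc3⟩)
          · refine ⟨x, List.mem_cons_self .., fun h' => hax h'.symm, ?_⟩
            rw [List.count_cons_self]; push_cast; omega
          · refine ⟨c, List.mem_cons_of_mem _ hc1, ?_, ?_⟩
            · intro h'
              have hac := lt_of_lt_of_le hlt (hxs c hc1)
              rw [h'] at hac
              exact lt_irrefl a hac
            · simpa [List.count_cons, Ne.symm hc2] using hc3
        · rintro ⟨c, hc1, hc2, hc3⟩
          rcases List.mem_cons.mp hc1 with h' | h'
          · subst h'
            rw [List.count_cons_self] at hc3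
            refine Or.inl ?_; push_cast at hc3; omega
          · by_cases hcx : c = x
            · subst hcx
              rw [List.count_cons_self] at hc3
              refine Or.inl ?_; push_cast at hc3; omega
            · refine Or.inr ⟨c, h', hcx, ?_⟩
              simpa [List.count_cons, Ne.symm hcx] using hc3
      have hmix : ∀ (f : Int) (k : Int), ¬ (run + (((x :: xs).count a : Nat) : Int) = k) →
          ((f = 1 ∨ (1 : Int) + (xs.count x : Int) = k ∨ (∃ c ∈ xs, c ≠ x ∧ (xs.count c : Int) = k)) ↔
           (f = 1 ∨ run + (((x :: xs).count a : Nat) : Int) = k ∨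
             (∃ c ∈ x :: xs, c ≠ a ∧ ((x :: xs).count c : Int) = k))) := by
        intro f k hnk
        constructor
        · rintro (h | h)
          · exact Or.inl h
          · exact Or.inr (Or.inr ((hE k).mp h))
        · rintro (h | h | h)
          · exact Or.inl h
          · exact absurd h hnk
          · exact Or.inr ((hE k).mpr h)
      rw [List.foldl_cons, hstep]
      by_cases hr2 : run = 2
      · subst hr2
        rw [if_pos rfl, key 1 th (Or.inr rfl) hth]
        congr 1
        · rw [if_pos (Or.inl rfl), if_pos (Or.inr (Or.inl (by rw [hcnt]; norm_num)))]
        · exact if_congr (hmix th 3 (by rw [hcnt]; norm_num)) rfl rfl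
      · by_cases hr3 : run = 3
        · subst hr3
          rw [if_neg hr2, if_pos rfl, key tw 1 htw (Or.inr rfl)]
          congr 1
          · exact if_congr (hmix tw 2 (by rw [hcnt]; norm_num)) rfl rfl
          · rw [if_pos (Or.inl rfl), if_pos (Or.inr (Or.inl (by rw [hcnt]; norm_num)))]
        · rw [if_neg hr2, if_neg hr3, key tw th htw hth]
          congr 1
          · exact if_congr (hmix tw 2 (by rw [hcnt]; omega)) rfl rfl
          · exact if_congr (hmix th 3 (by rw [hcnt]; omega)) rfl rfl

theorem mem_values_counter_iff (xs : List Char) (v : Int) :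
    v ∈ (PySem.Dict.counter xs).values ↔ ∃ c ∈ xs, (xs.count c : Int) = v := by
  simp [PySem.Dict.values, PySem.Dict.items_counter, PySem.Set.mem_ofList]

theorem split_head_count (x : Char) (xs : List Char) (k : Int) :
    (∃ c ∈ x :: xs, ((x :: xs).count c : Int) = k) ↔
      ((1 : Int) + (xs.count x : Int) = k ∨ ∃ c ∈ xs, c ≠ x ∧ (xs.count c : Int) = k) := by
  constructor
  · rintro ⟨c, hc1, hc3⟩
    rcases List.mem_cons.mp hc1 with h' | h'
    · subst h'
      rw [List.count_cons_self] at hc3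
      refine Or.inl ?_; push_cast at hc3; omega
    · by_cases hcx : c = x
      · subst hcx
        rw [List.count_cons_self] at hc3
        refine Or.inl ?_; push_cast at hc3; omega
      · exact Or.inr ⟨c, h', hcx, by simpa [List.count_cons, Ne.symm hcx] using hc3⟩
  · rintro (h | ⟨c, hc1, hc2, hc3⟩)
    · refine ⟨x, List.mem_cons_self .., ?_⟩
      rw [List.count_cons_self]; push_cast; omega
    · exact ⟨c, List.mem_cons_of_mem _ hc1, by simpa [List.count_cons, Ne.symm hc2] using hc3⟩

theorem exists_count_perm (l l' : List Char) (hp : l.Perm l') (k : Int) :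
    (∃ c ∈ l, (l.count c : Int) = k) ↔ (∃ c ∈ l', (l'.count c : Int) = k) := by
  constructor
  · rintro ⟨c, h1, h2⟩
    exact ⟨c, hp.mem_iff.mp h1, by rw [← hp.count_eq]; exact h2⟩
  · rintro ⟨c, h1, h2⟩
    exact ⟨c, hp.mem_iff.mpr h1, by rw [hp.count_eq]; exact h2⟩

-- ===== VERDICT (by name: the statement is the Claim_ definition above) =====
theorem generate_checksum_components_spec : Claim_equal_generate_checksum_components := by
  intro box _
  unfold Spec_generate_checksum_components generate_checksum_components generate_checksum_components_alt
  rw [pvALoop_char _ 0 0 (Or.inl rfl) (Or.inl rfl)]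
  rcases hcase : PySem.List.sorted box.toList (fun c => c) false with _ | ⟨x, xs⟩
  · have hnil : box.toList = [] := (PySem.List.sorted_eq_nil_iff ..).mp hcase
    rw [hnil]
    norm_num [pvBFinish, PySem.Dict.counter, PySem.Dict.empty, PySem.Dict.values, PySem.Dict.items]
  · have hpair : (x :: xs).Pairwise (fun a b => a ≤ b) := by
      have := PySem.List.sorted_pairwise box.toList (fun c => c) -- pairwise of sorted
      rw [hcase] at this
      exact this
    have hperm : (x :: xs).Perm box.toList := by
      have := PySem.List.sorted_perm box.toList (fun c => c) false
      rw [hcase] at this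
      exact this
    have hstep0 : pvBStep (0, 0, 0, none) x = (0, 0, 1, some x) := by
      simp [pvBStep]
    rw [List.foldl_cons, hstep0,
      pvB_inv xs (List.pairwise_cons.mp hpair).2 0 0 1 x (Or.inl rfl) (Or.inl rfl) le_rfl
        (List.pairwise_cons.mp hpair).1]
    have hbridge : ∀ k : Int, ((0 : Int) = 1 ∨ k ∈ (PySem.Dict.counter box.toList).values) ↔
        ((0 : Int) = 1 ∨ (1 : Int) + (xs.count x : Int) = k ∨
          ∃ c ∈ xs, c ≠ x ∧ (xs.count c : Int) = k) := by
      intro k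
      rw [mem_values_counter_iff, ← exists_count_perm _ _ hperm, split_head_count]
    congr 1
    · exact if_congr (hbridge 2) rfl rfl
    · exact if_congr (hbridge 3) rfl rfl
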